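-- pv_equiv track=rewrite | github.com/niancat286/Algorithms_and_Data_struct_Krenevych | Labs/Lab_05_Bin_Search_by_answer/t05_07_e5102.py | solve
-- ===== SOURCE A (Python) =====
-- def solve(n, x, y):
--
--     first_copy = min(x, y)
--
--     low = 0
--     high = (n - 1) * max(x, y)
--
--     while low < high:
--         t = low + (high - low) // 2
--         count = (t // x) + (t // y)
--
--         if count < n - 1:
--             low = t + 1
--         else:
--             high = t
--
--     return low + first_copy
-- ===== SOURCE B (Python) =====
-- def solve(n, x, y):
--     # Closed form: the answer is first_copy plus the (n-1)-th smallest merged multiple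
--     # T = min over a of max(a*x, (n-1-a)*y); max(a*x,(k-a)*y) is unimodal in a with the
--     # minimum at a = ceil(k*y/(x+y)), so only that point and its predecessor matter.
--     k = n - 1
--     if k <= 0:
--         return min(x, y)
--     a = -(-(k * y) // (x + y))
--     t = min(max((a - 1) * x, (k - a + 1) * y), max(a * x, (k - a) * y))
--     return t + min(x, y)
-- ===== Notes on version B (the rewrite author's own statement) =====
-- stated objective: faster
-- what changed: Replaces the binary search over the finish time (re-counting t//x + t//y at each probe) by an O(1) closed form: the answer is min(x,y) plus min over a of max(a*x, (n-1-a)*y), which is unimodal in a with its minimum at a = ceil((n-1)*y/(x+y)), so only that point and its predecessor are evaluated.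
-- outside the precondition, e.g. on solve(3, 0, 5): A raises ZeroDivisionError, B returns 0; on solve(3, -2, 5): A returns 8, B returns -10; on solve(0, -2, -5): A returns -3, B returns -5
import Mathlib
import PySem

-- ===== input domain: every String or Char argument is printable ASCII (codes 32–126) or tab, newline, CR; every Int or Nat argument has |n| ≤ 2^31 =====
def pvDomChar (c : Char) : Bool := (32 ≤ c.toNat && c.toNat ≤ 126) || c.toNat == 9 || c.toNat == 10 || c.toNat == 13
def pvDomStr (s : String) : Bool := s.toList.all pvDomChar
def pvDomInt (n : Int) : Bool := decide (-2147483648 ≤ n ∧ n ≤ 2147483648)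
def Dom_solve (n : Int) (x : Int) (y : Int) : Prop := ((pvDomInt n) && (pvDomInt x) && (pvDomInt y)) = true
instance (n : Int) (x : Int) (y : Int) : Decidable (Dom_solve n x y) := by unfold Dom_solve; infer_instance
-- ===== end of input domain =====

-- B replaces A's binary search over the finish time by an O(1) closed form: the answer is
-- min(x,y) plus min over a of max(a*x, (n-1-a)*y), attained at a = ceil((n-1)*y/(x+y)).

-- ===== PORT A =====
-- the while-loop of A, step for step; measure (high - low).toNat
def solveLoop (n : Int) (x : Int) (y : Int) (low : Int) (high : Int) : Int :=
  if h : low < high then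
    let t := low + PySem.Int.floordiv (high - low) 2
    let count := PySem.Int.floordiv t x + PySem.Int.floordiv t y
    if count < n - 1 then solveLoop n x y (t + 1) high else solveLoop n x y low t
  else low
termination_by (high - low).toNat
decreasing_by
  · have h1 := (PySem.Int.le_floordiv_iff_mul_le (a := high - low) (b := 2) (q := 0) (by omega)).mpr (by omega)
    omega
  · have h2 := (PySem.Int.floordiv_lt_iff_lt_mul (a := high - low) (b := 2) (q := high - low) (by omega)).mpr (by omega)
    omega

def solve (n : Int) (x : Int) (y : Int) : Int :=
  let first_copy := min x y
  let low : Int := 0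
  let high := (n - 1) * max x y
  solveLoop n x y low high + first_copy

-- ===== PORT B =====
def solve_alt (n : Int) (x : Int) (y : Int) : Int :=
  let k := n - 1
  if k ≤ 0 then min x y
  else
    let a := -(PySem.Int.floordiv (-(k * y)) (x + y))
    let t := min (max ((a - 1) * x) ((k - a + 1) * y)) (max (a * x) ((k - a) * y))
    t + min x y

-- ===== PRECONDITION & SPEC =====
-- Pre_ keeps the task's natural domain, positive copy times (plus the trivial instances n ≤ 1
-- that never enter A's loop): A raises ZeroDivisionError when a copy time is 0 with the other
-- positive and n ≥ 2, and for negative "times" its binary search runs over a non-monotone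
-- count predicate, returning meaningless values no one would specify.
def Pre_solve (n : Int) (x : Int) (y : Int) : Prop :=
  (1 ≤ x ∧ 1 ≤ y) ∨ (n ≤ 1 ∧ (0 ≤ max x y ∨ n = 1))
instance (n : Int) (x : Int) (y : Int) : Decidable (Pre_solve n x y) := by unfold Pre_solve; infer_instance
def pvWitness_solve : Int × Int × Int := (5, 2, 3)

def Spec_solve (n : Int) (x : Int) (y : Int) (out : Int) : Prop := out = solve_alt n x y
instance (n : Int) (x : Int) (y : Int) (out : Int) : Decidable (Spec_solve n x y out) := by unfold Spec_solve; infer_instance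

-- ===== CLAIM (what is proved, stated in full; the proofs are below) =====
def Claim_equal_solve : Prop := ∀ (n : Int) (x : Int) (y : Int), Dom_solve n x y → Pre_solve n x y → Spec_solve n x y (solve n x y)

-- ===== LEMMAS AND PROOFS =====

-- the counting function both programs are about: cnt t = number of multiples of x or y in [1, t]
def cnt (x y t : Int) : Int := PySem.Int.floordiv t x + PySem.Int.floordiv t y

-- the candidate finish time using a copies from the x-machine and k - a from the y-machine
def hval (x y k a : Int) : Int := max (a * x) ((k - a) * y)

theorem fdiv_mono {a b c : Int} (hc : 0 < c) (h : a ≤ b) :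
    PySem.Int.floordiv a c ≤ PySem.Int.floordiv b c := by
  rw [PySem.Int.le_floordiv_iff_mul_le hc]
  have := (PySem.Int.le_floordiv_iff_mul_le (a := a) (b := c)
    (q := PySem.Int.floordiv a c) hc).mp le_rfl
  omega

theorem cnt_mono {x y a b : Int} (hx : 0 < x) (hy : 0 < y) (h : a ≤ b) :
    cnt x y a ≤ cnt x y b := by
  have h1 := fdiv_mono hx h
  have h2 := fdiv_mono hy h
  unfold cnt; omega

-- A's loop returns T whenever T is the least point where cnt reaches n - 1, and low ≤ T ≤ high
theorem solveLoop_eq {x y : Int} (hx : 0 < x) (hy : 0 < y) (n T : Int)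
    (hT : n - 1 ≤ cnt x y T) (hTmin : ∀ s, s < T → cnt x y s < n - 1) :
    ∀ (m : Nat) (low high : Int), (high - low).toNat = m → low ≤ T → T ≤ high →
      solveLoop n x y low high = T := by
  intro m
  induction m using Nat.strong_induction_on with
  | _ m ih =>
    intro low high hm hlowT hThigh
    rw [solveLoop]
    by_cases h : low < high
    · simp only [h, dif_pos]
      set t := low + PySem.Int.floordiv (high - low) 2 with ht
      have hmidlo := (PySem.Int.le_floordiv_iff_mul_le (a := high - low) (b := 2) (q := 0) (by omega)).mpr (by omega)
      have hmidhi := (PySem.Int.floordiv_lt_iff_lt_mul (a := high - low) (b := 2) (q := high - low) (by omega)).mpr (by omega)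
      have hlt : low ≤ t ∧ t < high := by omega
      by_cases hc : PySem.Int.floordiv t x + PySem.Int.floordiv t y < n - 1
      · simp only [hc, if_pos]
        have htT : t < T := by
          by_contra hcon
          have := cnt_mono hx hy (show T ≤ t by omega)
          unfold cnt at this hT; omega
        exact ih (high - (t + 1)).toNat (by omega) (t + 1) high rfl (by omega) hThigh
      · simp only [hc, if_neg, not_false_iff]
        have hTt : T ≤ t := by
          by_contra hcon
          have := hTmin t (by omega)
          unfold cnt at this; omega
        exact ih (t - low).toNat (by omega) low t rfl hlowT hTt
    · simp only [h, dif_neg, not_false_iff]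
      omega

-- each candidate reaches count k
theorem hval_cnt_ge {x y : Int} (hx : 0 < x) (hy : 0 < y) (k a : Int) :
    k ≤ cnt x y (hval x y k a) := by
  have h1 := (PySem.Int.le_floordiv_iff_mul_le (a := hval x y k a) (b := x) (q := a) hx).mpr (le_max_left _ _)
  have h2 := (PySem.Int.le_floordiv_iff_mul_le (a := hval x y k a) (b := y) (q := k - a) hy).mpr (le_max_right _ _)
  unfold cnt; omega

-- hval is unimodal in a with minimum at the ceiling point a (given its bracketing inequalities)
theorem hval_min_le {x y k a : Int} (hx : 0 < x) (hy : 0 < y)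
    (hc1 : (a - 1) * (x + y) < k * y) (hc2 : k * y ≤ a * (x + y)) :
    ∀ b, 0 ≤ b → b ≤ k → min (hval x y k (a - 1)) (hval x y k a) ≤ hval x y k b := by
  intro b hb0 hbk
  by_cases hb : a ≤ b
  · refine le_trans (min_le_right _ _) ?_
    have ea : hval x y k a = a * x := max_eq_left (by nlinarith)
    have eb : hval x y k b = b * x := max_eq_left (by nlinarith)
    rw [ea, eb]; nlinarith
  · refine le_trans (min_le_left _ _) ?_
    have ea : hval x y k (a - 1) = (k - (a - 1)) * y := max_eq_right (by nlinarith)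
    have eb : hval x y k b = (k - b) * y := max_eq_right (by nlinarith)
    rw [ea, eb]; nlinarith

-- nothing below B's value reaches count k
theorem bval_least {x y k a : Int} (hx : 0 < x) (hy : 0 < y) (hk : 1 ≤ k)
    (hc1 : (a - 1) * (x + y) < k * y) (hc2 : k * y ≤ a * (x + y)) :
    ∀ s, s < min (hval x y k (a - 1)) (hval x y k a) → cnt x y s < k := by
  intro s hs
  by_contra hcon
  rw [not_lt] at hcon
  rcases lt_or_ge s 0 with hneg | hpos
  · have h1 := (PySem.Int.floordiv_lt_iff_lt_mul (a := s) (b := x) (q := 0) hx).mpr (by omega)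
    have h2 := (PySem.Int.floordiv_lt_iff_lt_mul (a := s) (b := y) (q := 0) hy).mpr (by omega)
    unfold cnt at hcon; omega
  · have hdx0 := (PySem.Int.le_floordiv_iff_mul_le (a := s) (b := x) (q := 0) hx).mpr (by omega)
    have hdy0 := (PySem.Int.le_floordiv_iff_mul_le (a := s) (b := y) (q := 0) hy).mpr (by omega)
    have hdxs := (PySem.Int.le_floordiv_iff_mul_le (a := s) (b := x) (q := PySem.Int.floordiv s x) hx).mp le_rfl
    have hdys := (PySem.Int.le_floordiv_iff_mul_le (a := s) (b := y) (q := PySem.Int.floordiv s y) hy).mp le_rfl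
    unfold cnt at hcon
    rcases le_or_gt (k - PySem.Int.floordiv s y) 0 with hb | hb
    · -- already k multiples of y alone fit below s: candidate b = 0 is ≤ s
      have h0 : hval x y k 0 ≤ s := by
        unfold hval
        have : k * y ≤ PySem.Int.floordiv s y * y := by nlinarith
        simp only [zero_mul, Int.sub_zero]
        exact max_le (by nlinarith) (by omega)
      have := hval_min_le hx hy hc1 hc2 0 le_rfl (by omega)
      omega
    · -- candidate b = k - s//y fits below s
      set b := k - PySem.Int.floordiv s y with hbdef
      have hbx : b * x ≤ s := by
        have : b ≤ PySem.Int.floordiv s x := by omega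
        nlinarith
      have hby : (k - b) * y ≤ s := by
        have hkb : k - b = PySem.Int.floordiv s y := by omega
        rw [hkb]; exact hdys
      have h0 : hval x y k b ≤ s := max_le hbx hby
      have := hval_min_le hx hy hc1 hc2 b (by omega) (by omega)
      omega

-- ===== VERDICT (by name: the statement is the Claim_ definition above) =====
theorem solve_spec : Claim_equal_solve := by
  intro n x y _ hpre
  unfold Spec_solve solve solve_alt
  show solveLoop n x y 0 ((n - 1) * max x y) + min x y = _
  by_cases hn : n - 1 ≤ 0
  · -- high ≤ 0 = low: A's loop is skipped; B takes the trivial branch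
    have hhigh : (n - 1) * max x y ≤ 0 := by
      rcases hpre with ⟨hx1, hy1⟩ | ⟨_, hmax | hn1⟩
      · nlinarith [le_max_left x y]
      · nlinarith
      · rw [hn1]; simp
    have hA : solveLoop n x y 0 ((n - 1) * max x y) = 0 := by
      rw [solveLoop]; simp only [dif_neg (show ¬ (0 : Int) < (n - 1) * max x y by omega)]
    rw [hA, if_pos hn]
    omega
  · -- n ≥ 2: only the positive-times branch of Pre_ applies
    rcases hpre with ⟨hx1, hy1⟩ | ⟨hle, _⟩
    swap
    · omega
    have hx : (0 : Int) < x := by omega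
    have hy : (0 : Int) < y := by omega
    have hk : 1 ≤ n - 1 := by omega
    simp only [if_neg (show ¬ n - 1 ≤ 0 by omega)]
    set a := -(PySem.Int.floordiv (-((n - 1) * y)) (x + y)) with hadef
    obtain ⟨hc1, hc2⟩ := (PySem.Int.neg_floordiv_neg_eq_iff_of_pos
      (a := (n - 1) * y) (b := x + y) (q := a) (by omega)).mp rfl
    have ha1 : 1 ≤ a := by nlinarith
    have hak : a ≤ n - 1 := by nlinarith
    -- B's value, as the least point where cnt reaches n - 1
    have hge : n - 1 ≤ cnt x y (min (hval x y (n - 1) (a - 1)) (hval x y (n - 1) a)) := by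
      rcases min_cases (hval x y (n - 1) (a - 1)) (hval x y (n - 1) a) with ⟨he, _⟩ | ⟨he, _⟩ <;>
        rw [he] <;> exact hval_cnt_ge hx hy _ _
    have hlt := bval_least hx hy hk hc1 hc2
    have hT0 : 0 ≤ min (hval x y (n - 1) (a - 1)) (hval x y (n - 1) a) := by
      refine le_min ?_ ?_ <;> exact le_trans (by nlinarith) (le_max_left _ _)
    -- the answer fits under A's search bound, since cnt high ≥ n - 1
    have hhx : (n - 1) * x ≤ (n - 1) * max x y := by nlinarith [le_max_left x y]
    have h1 := (PySem.Int.le_floordiv_iff_mul_le (a := (n - 1) * max x y) (b := x) (q := n - 1) hx).mpr hhx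
    have h2 := (PySem.Int.le_floordiv_iff_mul_le (a := (n - 1) * max x y) (b := y) (q := 0) hy).mpr (by nlinarith [le_max_right x y])
    have hThigh : min (hval x y (n - 1) (a - 1)) (hval x y (n - 1) a) ≤ (n - 1) * max x y := by
      by_contra hcon
      have := hlt ((n - 1) * max x y) (by omega)
      unfold cnt at this; omega
    have := solveLoop_eq hx hy n (min (hval x y (n - 1) (a - 1)) (hval x y (n - 1) a))
      hge hlt ((n - 1) * max x y - 0).toNat 0 ((n - 1) * max x y) rfl hT0 hThigh
    rw [this]
    unfold hval
    have he : n - 1 - (a - 1) = n - 1 - a + 1 := by ring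
    rw [he]
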